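-- pv_equiv track=rewrite | github.com/apaku/aoc2018 | puzzle5/puzzle5.py | reactedchain
-- ===== SOURCE A (Python) =====
-- def reactedchain(unreactedchain):
--     chain = list(unreactedchain)
--     while True:
--         newchain = list(chain)
--         for i in range(len(chain) - 1):
--             c1 = chain[i]
--             c2 = chain[i + 1]
--             c1l = c1.lower()
--             c2l = c2.lower()
--             if c1l == c2l and (c1 != c2):
--                 newchain = chain[:i] + chain[i + 2:]
--                 break
--         #newchain = list(reactedchain(chain))
--         if len(newchain) == len(chain):
--             break
--         chain = newchain
--     return chain
-- ===== SOURCE B (Python) =====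
-- def reactedchain(unreactedchain):
--     pairs = []
--     for i in range(26):
--         lo = chr(97 + i)
--         up = chr(65 + i)
--         pairs.append(lo + up)
--         pairs.append(up + lo)
--     s = unreactedchain
--     while True:
--         t = s
--         for p in pairs:
--             t = t.replace(p, '')
--         if len(t) == len(s):
--             return list(s)
--         s = t
-- ===== Notes on version B (the rewrite author's own statement) =====
-- stated objective: faster
-- what changed: Replaced the restart-the-whole-scan-after-each-single-pair-removal loop with a fixpoint of bulk str.replace calls that delete every occurrence of each of the 52 reacting two-letter pairs per round.
import Mathlib
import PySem

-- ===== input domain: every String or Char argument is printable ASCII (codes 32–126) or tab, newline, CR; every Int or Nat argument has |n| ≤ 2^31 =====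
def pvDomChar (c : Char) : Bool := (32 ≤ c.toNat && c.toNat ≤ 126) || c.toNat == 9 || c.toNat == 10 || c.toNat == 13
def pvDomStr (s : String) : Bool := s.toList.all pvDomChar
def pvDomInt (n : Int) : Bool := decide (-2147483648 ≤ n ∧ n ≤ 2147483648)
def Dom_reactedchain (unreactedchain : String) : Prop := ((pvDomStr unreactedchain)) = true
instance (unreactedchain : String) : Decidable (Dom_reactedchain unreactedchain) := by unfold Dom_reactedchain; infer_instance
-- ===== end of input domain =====

-- B replaces A's "rescan from the start after each single removed pair" loop by a
-- fixpoint of bulk replace('<pair>','') calls over the 52 reacting two-letter pairs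
-- (measured faster; see claim).

-- ===== PORT A =====
-- c1.lower() == c2.lower() and (c1 != c2)
def pvReacts (c1 c2 : Char) : Bool :=
  (PySem.Chars.lowerChar c1 == PySem.Chars.lowerChar c2) && (c1 != c2)

-- the inner `for i in range(len(chain)-1)` loop: first i with a reacting pair gives
-- `some (chain[:i] + chain[i+2:])` (the broken-out newchain); none = no pair found
def pvScanA : List Char → Option (List Char)
  | c1 :: c2 :: rest =>
    if pvReacts c1 c2 then some rest else (pvScanA (c2 :: rest)).map (c1 :: ·)
  | _ => none

theorem pvScanA_length : ∀ (l l' : List Char), pvScanA l = some l' → l'.length + 2 = l.length := by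
  intro l
  induction l with
  | nil => intro l' h; simp [pvScanA] at h
  | cons c1 t ih =>
    intro l' h
    match t, h with
    | c2 :: rest, h =>
      rw [pvScanA] at h
      split at h
      · cases h; simp
      · rcases Option.map_eq_some_iff.mp h with ⟨l'', h1, rfl⟩
        have := ih l'' h1
        simp at this ⊢
        omega

-- the `while True` loop: `if len(newchain) == len(chain): break` means "no pair found";
-- otherwise chain = newchain and rescan
def pvLoopA (chain : List Char) : List Char :=
  match _h : pvScanA chain with
  | some newchain => pvLoopA newchain
  | none => chain
termination_by chain.length
decreasing_by have := pvScanA_length chain newchain _h; omega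

def reactedchain (unreactedchain : String) : List String :=
  (pvLoopA unreactedchain.toList).map (fun c => String.ofList [c])

-- ===== PORT B =====
-- the pairs list built by the `for i in range(26)` loop: "aA","Aa","bB","Bb",…
def pvPairs : List (List Char) :=
  (List.range 26).flatMap (fun i =>
    [[Char.ofNat (97 + i), Char.ofNat (65 + i)], [Char.ofNat (65 + i), Char.ofNat (97 + i)]])

-- termination facts for the while loop: each replace(p, '') can only shrink the string
theorem pvReplaceGo_length_le (old : List Char) :
    ∀ (fuel : Nat) (l acc : List Char),
      (PySem.Chars.replace.go old [] fuel l acc).length ≤ acc.length + l.length := by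
  intro fuel
  induction fuel with
  | zero => intro l acc; rw [PySem.Chars.replace.go]; simp
  | succ fuel ih =>
    intro l acc
    match l with
    | [] =>
      rw [PySem.Chars.replace.go]
      · simp
      · omega
    | c :: t =>
      rw [PySem.Chars.replace.go]
      split
      · have h := ih (List.drop old.length (c :: t)) ([].reverse ++ acc)
        have : (List.drop old.length (c :: t)).length ≤ (c :: t).length := by
          simp [List.length_drop]
        simp at h ⊢
        omega
      · have h := ih t (c :: acc)
        simp at h ⊢
        omega

theorem pvReplace_length_le (u p : List Char) :
    (PySem.Chars.replace u p []).length ≤ u.length := by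
  rw [PySem.Chars.replace]
  split
  · rename_i hp
    have : List.flatMap (fun c => c :: []) u = u := by
      induction u with
      | nil => rfl
      | cons c t ih => simp [List.flatMap] at ih ⊢; exact ih
    simp [this]
  · have := pvReplaceGo_length_le p u.length u []
    simpa using this

theorem pvFoldRep_length_le : ∀ (ps : List (List Char)) (s : List Char),
    (ps.foldl (fun u p => PySem.Chars.replace u p []) s).length ≤ s.length := by
  intro ps
  induction ps with
  | nil => intro s; simp
  | cons p ps ih =>
    intro s
    calc ((p :: ps).foldl (fun u p => PySem.Chars.replace u p []) s).length
        = (ps.foldl (fun u p => PySem.Chars.replace u p []) (PySem.Chars.replace s p [])).length := rfl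
      _ ≤ (PySem.Chars.replace s p []).length := ih _
      _ ≤ s.length := pvReplace_length_le s p

-- the `while True` loop of B: one round of the 52 replaces, stop when the length is unchanged
def pvLoopB (s : List Char) : List Char :=
  let t := pvPairs.foldl (fun u p => PySem.Chars.replace u p []) s
  if t.length = s.length then s else pvLoopB t
termination_by s.length
decreasing_by
  rename_i hne
  have h1 := pvFoldRep_length_le pvPairs s
  simp only [t] at hne ⊢
  omega

def reactedchain_alt (unreactedchain : String) : List String :=
  (pvLoopB unreactedchain.toList).map (fun c => String.ofList [c])

-- ===== PRECONDITION & SPEC =====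
def Spec_reactedchain (unreactedchain : String) (out : List String) : Prop := out = reactedchain_alt unreactedchain
instance (unreactedchain : String) (out : List String) : Decidable (Spec_reactedchain unreactedchain out) := by unfold Spec_reactedchain; infer_instance

-- ===== CLAIM (what is proved, stated in full; the proofs are below) =====
def Claim_equal_reactedchain : Prop := ∀ (unreactedchain : String), Dom_reactedchain unreactedchain → Spec_reactedchain unreactedchain (reactedchain unreactedchain)

-- ===== LEMMAS AND PROOFS =====
-- Both programs compute the polymer's normal form; the proof shows each equals the
-- one-pass stack reduction `(foldl pvStep []).reverse` and is organised so:
--  1. character facts about Python's str.lower (a unit reacts only with its own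
--     opposite-case copy);
--  2. the stack pass: invariant, cancellation of one reacting pair, behaviour on
--     fully-reacted chains;
--  3. A's leftmost-pair-removal loop equals the stack pass;
--  4. replace(p,'') is the simple pair-deletion recursion pvRep, which the stack
--     pass cannot distinguish from the identity; B's fixpoint equals the stack pass.

-- character facts about Python's str.lower on single chars
theorem pvLower_def (c : Char) :
    PySem.Chars.lowerChar c =
      if (decide ('A' ≤ c) && decide (c ≤ 'Z')) = true then Char.ofNat (c.toNat + 32) else c := by
  unfold PySem.Chars.lowerChar; rfl

theorem pvLe_toNat (c d : Char) : c ≤ d ↔ c.toNat ≤ d.toNat := by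
  rw [Char.le_def, UInt32.le_iff_toNat_le]; rfl

theorem pvToNat_inj (c d : Char) (h : c.toNat = d.toNat) : c = d := by
  apply Char.ext; exact UInt32.toNat_inj.mp h

theorem pvOfNat_toNat (n : Nat) (h : n < 1000) : (Char.ofNat n).toNat = n := by
  have : n.isValidChar := Or.inl (by omega)
  simp [Char.ofNat, this, Char.ofNatAux, Char.toNat]

theorem pvLower_fix (c : Char) (h : ¬ (65 ≤ c.toNat ∧ c.toNat ≤ 90)) :
    PySem.Chars.lowerChar c = c := by
  rw [pvLower_def]
  have : ¬ ((decide ('A' ≤ c) && decide (c ≤ 'Z')) = true) := by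
    simp only [Bool.and_eq_true, decide_eq_true_eq, pvLe_toNat]
    intro ⟨h1, h2⟩
    exact h ⟨h1, h2⟩
  simp [this]

theorem pvLower_upper (c : Char) (h : 65 ≤ c.toNat ∧ c.toNat ≤ 90) :
    (PySem.Chars.lowerChar c).toNat = c.toNat + 32 := by
  rw [pvLower_def]
  have : (decide ('A' ≤ c) && decide (c ≤ 'Z')) = true := by
    simp only [Bool.and_eq_true, decide_eq_true_eq, pvLe_toNat]
    exact ⟨h.1, h.2⟩
  rw [if_pos this]
  exact pvOfNat_toNat _ (by omega)

-- a reacting pair is an upper-case letter next to its own lower-case copy (either order)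
theorem pvReacts_shape (c d : Char) (h : pvReacts c d = true) :
    (65 ≤ c.toNat ∧ c.toNat ≤ 90 ∧ d.toNat = c.toNat + 32) ∨
    (65 ≤ d.toNat ∧ d.toNat ≤ 90 ∧ c.toNat = d.toNat + 32) := by
  simp only [pvReacts, Bool.and_eq_true, beq_iff_eq, bne_iff_ne, ne_eq] at h
  obtain ⟨hl, hne⟩ := h
  by_cases uc : 65 ≤ c.toNat ∧ c.toNat ≤ 90
  · by_cases ud : 65 ≤ d.toNat ∧ d.toNat ≤ 90
    · exfalso; apply hne; apply pvToNat_inj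
      have e1 := pvLower_upper c uc
      have e2 := pvLower_upper d ud
      have e3 := congrArg Char.toNat hl
      omega
    · left
      rw [pvLower_fix d ud] at hl
      have := pvLower_upper c uc
      rw [hl] at this
      exact ⟨uc.1, uc.2, this⟩
  · by_cases ud : 65 ≤ d.toNat ∧ d.toNat ≤ 90
    · right
      rw [pvLower_fix c uc] at hl
      have := pvLower_upper d ud
      rw [← hl] at this
      exact ⟨ud.1, ud.2, this⟩
    · exfalso; apply hne
      rw [pvLower_fix c uc, pvLower_fix d ud] at hl
      exact hl

-- the only partner a unit can react with is the opposite-case copy of itself,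
-- so two units both reacting with `a` are equal
theorem pvReacts_partner_eq (x a b : Char)
    (h1 : pvReacts x a = true) (h2 : pvReacts a b = true) : x = b := by
  rcases pvReacts_shape x a h1 with ⟨hx1, hx2, hx3⟩ | ⟨hx1, hx2, hx3⟩ <;>
    rcases pvReacts_shape a b h2 with ⟨hy1, hy2, hy3⟩ | ⟨hy1, hy2, hy3⟩ <;>
    (apply pvToNat_inj; omega)

-- "no adjacent pair of l reacts", in string order
def pvIrr (l : List Char) : Prop := List.IsChain (fun c1 c2 => pvReacts c1 c2 = false) l

-- the stack invariant: each element does not react with the element just below it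
def pvStIrr (st : List Char) : Prop := List.IsChain (fun top below => pvReacts below top = false) st

-- the one-pass stack step (proof device shared by both directions)
def pvStep (stack : List Char) (c : Char) : List Char :=
  match stack with
  | top :: rest => if pvReacts top c then rest else c :: top :: rest
  | [] => [c]

theorem pvScanA_none_irr : ∀ (l : List Char), pvScanA l = none → pvIrr l := by
  intro l
  induction l with
  | nil => intro _; exact List.isChain_nil
  | cons c1 t ih =>
    intro h
    match t with
    | [] => exact List.isChain_singleton _
    | c2 :: rest =>
      rw [pvScanA] at h
      split at h
      · exact absurd h (by simp)
      · rename_i hr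
        have h2 : pvScanA (c2 :: rest) = none := by
          cases hh : pvScanA (c2 :: rest) with
          | none => rfl
          | some v => rw [hh] at h; simp at h
        exact List.isChain_cons_cons.mpr ⟨Bool.eq_false_iff.mpr hr, ih h2⟩

theorem pvScanA_some_decomp : ∀ (l l' : List Char), pvScanA l = some l' →
    ∃ u a b v, l = u ++ a :: b :: v ∧ pvReacts a b = true ∧ l' = u ++ v := by
  intro l
  induction l with
  | nil => intro l' h; simp [pvScanA] at h
  | cons c1 t ih =>
    intro l' h
    cases t with
    | nil => simp [pvScanA] at h
    | cons c2 r2 =>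
      rw [pvScanA] at h
      split at h
      · rename_i hr
        exact ⟨[], c1, c2, r2, by simp, hr, (Option.some.inj h).symm⟩
      · rcases Option.map_eq_some_iff.mp h with ⟨l'', h1, rfl⟩
        rcases ih l'' h1 with ⟨u, a, b, v, hdec, hr, hres⟩
        exact ⟨c1 :: u, a, b, v, by rw [hdec]; rfl, hr, by rw [hres]; rfl⟩

theorem pvStep_stIrr (st : List Char) (c : Char) (h : pvStIrr st) : pvStIrr (pvStep st c) := by
  match st with
  | [] => exact List.isChain_singleton c
  | top :: rest =>
    rw [pvStep]
    split
    · exact h.tail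
    · rename_i hr
      exact List.isChain_cons_cons.mpr ⟨Bool.eq_false_iff.mpr hr, h⟩

theorem pvFoldl_stIrr (l : List Char) : ∀ st, pvStIrr st → pvStIrr (l.foldl pvStep st) := by
  induction l with
  | nil => intro st h; exact h
  | cons c t ih => intro st h; exact ih _ (pvStep_stIrr st c h)

-- removing a reacting pair does not change the final stack
theorem pvStep_cancel (s : List Char) (a b : Char)
    (hr : pvReacts a b = true) (hs : pvStIrr s) : pvStep (pvStep s a) b = s := by
  match s with
  | [] =>
    rw [pvStep, pvStep, if_pos hr]
  | x :: s' =>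
    rw [pvStep]
    split
    · rename_i hxa
      have hxb : x = b := pvReacts_partner_eq x a b hxa hr
      match s' with
      | [] => rw [pvStep, hxb]
      | y :: s'' =>
        have hyx : pvReacts y x = false := hs.rel_head
        rw [pvStep, if_neg (by rw [← hxb]; simp [hyx]), hxb]
    · rw [pvStep, if_pos hr]

-- on an already fully-reacted chain the stack pass only pushes
theorem pvFoldl_of_irr : ∀ (l st : List Char), pvIrr (st.reverse ++ l) →
    l.foldl pvStep st = l.reverse ++ st := by
  intro l
  induction l with
  | nil => intro st _; simp
  | cons c rest ih =>
    intro st h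
    rw [List.foldl_cons]
    match st with
    | [] =>
      have : pvStep [] c = [c] := rfl
      rw [this, ih [c] (by simpa using h)]
      simp
    | x :: s' =>
      have hxc : pvReacts x c = false := by
        have := (List.isChain_append.mp h).2.2
        apply this x _ c rfl
        simp
      have : pvStep (x :: s') c = c :: x :: s' := by rw [pvStep, if_neg (by simp [hxc])]
      rw [this, ih (c :: x :: s') (by simpa [List.append_assoc] using h)]
      simp

-- main lemma for A: repeated leftmost-pair removal computes the stack result
theorem pvLoopA_eq_stack : ∀ (l : List Char), pvLoopA l = (l.foldl pvStep []).reverse := by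
  intro l
  induction hn : l.length using Nat.strong_induction_on generalizing l with
  | _ n ih =>
    rw [pvLoopA]
    split
    · rename_i newchain hscan
      rcases pvScanA_some_decomp l newchain hscan with ⟨u, a, b, v, hdec, hr, hres⟩
      have hlen := pvScanA_length l newchain hscan
      have hfold : l.foldl pvStep [] = newchain.foldl pvStep [] := by
        rw [hdec, hres]
        rw [show u ++ a :: b :: v = (u ++ [a, b]) ++ v by simp]
        rw [List.foldl_append, List.foldl_append, List.foldl_append]
        congr 1
        have hst : pvStIrr (u.foldl pvStep []) := pvFoldl_stIrr u [] List.isChain_nil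
        calc [a, b].foldl pvStep (u.foldl pvStep [])
            = pvStep (pvStep (u.foldl pvStep []) a) b := rfl
          _ = u.foldl pvStep [] := pvStep_cancel _ a b hr hst
          _ = [].foldl pvStep (u.foldl pvStep []) := rfl
      rw [hfold, ih newchain.length (by omega) newchain rfl]
    · rename_i hscan
      have hirr := pvScanA_none_irr l hscan
      rw [pvFoldl_of_irr l [] (by simpa using hirr)]
      simp

-- ---- B side: replace(p, '') as a simple recursion ----

-- delete left-to-right every (non-overlapping) occurrence of the two chars x y
def pvRep (x y : Char) : List Char → List Char
  | [] => []
  | [c] => [c]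
  | c :: d :: t => if c = x ∧ d = y then pvRep x y t else c :: pvRep x y (d :: t)

theorem pvRep_length_le (x y : Char) : ∀ (l : List Char), (pvRep x y l).length ≤ l.length := by
  intro l
  induction l using pvRep.induct x y with
  | case1 => simp [pvRep]
  | case2 c => simp [pvRep]
  | case3 c d t hcd ih =>
    rw [pvRep, if_pos hcd]
    simp
    omega
  | case4 c d t hcd ih =>
    rw [pvRep, if_neg hcd]
    simp at ih ⊢
    omega

-- replace.go with new = '' computes pvRep (fuel = the list's length suffices)
theorem pvReplaceGo_eq_pvRep (x y : Char) :
    ∀ (fuel : Nat) (l acc : List Char), l.length ≤ fuel →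
      PySem.Chars.replace.go [x, y] [] fuel l acc = acc.reverse ++ pvRep x y l := by
  intro fuel
  induction fuel with
  | zero =>
    intro l acc h
    have : l = [] := List.length_eq_zero_iff.mp (by omega)
    subst this
    rw [PySem.Chars.replace.go]; simp [pvRep]
  | succ fuel ih =>
    intro l acc h
    match l with
    | [] =>
      rw [PySem.Chars.replace.go]
      · simp [pvRep]
      · omega
    | [c] =>
      rw [PySem.Chars.replace.go]
      have hpre : [x, y].isPrefixOf [c] = false := by
        cases hxy : [x, y].isPrefixOf [c]
        · rfl
        · exfalso
          have := List.isPrefixOf_iff_prefix.mp hxy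
          have := this.length_le
          simp at this
      rw [hpre]
      simp only [Bool.false_eq_true, if_false]
      rw [ih [] (c :: acc) (by simp)]
      simp [pvRep]
    | c :: d :: t =>
      rw [PySem.Chars.replace.go]
      by_cases hcd : c = x ∧ d = y
      · obtain ⟨rfl, rfl⟩ := hcd
        have hpre : [c, d].isPrefixOf (c :: d :: t) = true := by
          apply List.isPrefixOf_iff_prefix.mpr
          exact ⟨t, rfl⟩
        rw [hpre]
        simp only [if_pos, List.reverse_nil, List.nil_append, List.length_cons,
          List.length_nil, List.drop_succ_cons, List.drop_zero]
        simp only [List.length_cons] at h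
        rw [ih t acc (by omega)]
        rw [pvRep, if_pos ⟨rfl, rfl⟩]
      · have hpre : [x, y].isPrefixOf (c :: d :: t) = false := by
          cases hxy : [x, y].isPrefixOf (c :: d :: t)
          · rfl
          · exfalso
            rcases List.isPrefixOf_iff_prefix.mp hxy with ⟨t', ht'⟩
            simp at ht'
            exact hcd ⟨ht'.1.symm, ht'.2.1.symm⟩
        rw [hpre]
        simp only [Bool.false_eq_true, if_false]
        simp only [List.length_cons] at h
        rw [ih (d :: t) (c :: acc) (by simp; omega)]
        rw [pvRep, if_neg hcd]
        simp
theorem pvReplace_eq_pvRep (x y : Char) (l : List Char) :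
    PySem.Chars.replace l [x, y] [] = pvRep x y l := by
  rw [PySem.Chars.replace]
  have : ([x, y] : List Char).isEmpty = false := rfl
  rw [this]
  simp only [Bool.false_eq_true, if_false]
  exact (pvReplaceGo_eq_pvRep x y l.length l [] le_rfl).trans (by simp)

-- the stack pass cannot tell pvRep's output from its input
theorem pvRep_foldl (x y : Char) (hr : pvReacts x y = true) :
    ∀ (l st : List Char), pvStIrr st →
      (pvRep x y l).foldl pvStep st = l.foldl pvStep st := by
  intro l
  induction hn : l.length using Nat.strong_induction_on generalizing l with
  | _ n ih =>
    intro st hst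
    match l with
    | [] => rw [pvRep]
    | [c] => rw [pvRep]
    | c :: d :: t =>
      rw [pvRep]
      split
      · rename_i hcd
        obtain ⟨rfl, rfl⟩ := hcd
        have h1 : (c :: d :: t).foldl pvStep st = t.foldl pvStep st := by
          rw [List.foldl_cons, List.foldl_cons, pvStep_cancel st c d hr hst]
        rw [h1]
        exact ih t.length (by simp at hn; omega) t rfl st hst
      · rw [List.foldl_cons, List.foldl_cons]
        exact ih (d :: t).length (by simp at hn ⊢; omega) (d :: t) rfl
          (pvStep st c) (pvStep_stIrr st c hst)

-- pvRep keeping the length means it removed nothing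
theorem pvRep_eq_self_of_length (x y : Char) :
    ∀ (l : List Char), (pvRep x y l).length = l.length → pvRep x y l = l := by
  intro l
  induction l using pvRep.induct x y with
  | case1 => intro _; rw [pvRep]
  | case2 c => intro _; rw [pvRep]
  | case3 c d t hcd ih =>
    intro hlen
    exfalso
    rw [pvRep, if_pos hcd] at hlen
    have := pvRep_length_le x y t
    simp only [List.length_cons] at hlen
    omega
  | case4 c d t hcd ih =>
    intro hlen
    rw [pvRep, if_neg hcd] at hlen ⊢
    simp only [List.length_cons] at hlen
    rw [ih (by simp only [List.length_cons]; omega)]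

-- a fixed point of pvRep has no adjacent occurrence of x y
theorem pvRep_fix_chain (x y : Char) :
    ∀ (l : List Char), pvRep x y l = l →
      List.IsChain (fun c d => ¬ (c = x ∧ d = y)) l := by
  intro l
  induction l using pvRep.induct x y with
  | case1 => intro _; exact List.isChain_nil
  | case2 c => intro _; exact List.isChain_singleton c
  | case3 c d t hcd ih =>
    intro hfix
    exfalso
    rw [pvRep, if_pos hcd] at hfix
    have h1 := congrArg List.length hfix
    have h2 := pvRep_length_le x y t
    simp only [List.length_cons] at h1
    omega
  | case4 c d t hcd ih =>
    intro hfix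
    rw [pvRep, if_neg hcd] at hfix
    have htail : pvRep x y (d :: t) = d :: t := (List.cons.inj hfix).2
    exact List.isChain_cons_cons.mpr ⟨hcd, ih htail⟩

-- every entry of pairs is a reacting two-char string
theorem pvPairs_shape : ∀ p ∈ pvPairs,
    (match p with | [x, y] => pvReacts x y | _ => false) = true := by
  decide

-- and conversely every reacting pair of units occurs in pairs
theorem pvReacts_mem_pairs (c d : Char) (h : pvReacts c d = true) : [c, d] ∈ pvPairs := by
  rcases pvReacts_shape c d h with ⟨h1, h2, h3⟩ | ⟨h1, h2, h3⟩
  · -- c upper, d = c+32 : the entry [ofNat (65+i), ofNat (97+i)] with i = c.toNat - 65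
    apply List.mem_flatMap.mpr
    refine ⟨c.toNat - 65, List.mem_range.mpr (by omega), ?_⟩
    have e1 : Char.ofNat (97 + (c.toNat - 65)) = d :=
      pvToNat_inj _ _ (by rw [pvOfNat_toNat _ (by omega)]; omega)
    have e2 : Char.ofNat (65 + (c.toNat - 65)) = c :=
      pvToNat_inj _ _ (by rw [pvOfNat_toNat _ (by omega)]; omega)
    rw [e1, e2]
    simp
  · -- d upper, c = d+32
    apply List.mem_flatMap.mpr
    refine ⟨d.toNat - 65, List.mem_range.mpr (by omega), ?_⟩
    have e1 : Char.ofNat (97 + (d.toNat - 65)) = c :=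
      pvToNat_inj _ _ (by rw [pvOfNat_toNat _ (by omega)]; omega)
    have e2 : Char.ofNat (65 + (d.toNat - 65)) = d :=
      pvToNat_inj _ _ (by rw [pvOfNat_toNat _ (by omega)]; omega)
    rw [e1, e2]
    simp

-- the round of 52 replaces, as it appears in pvLoopB
theorem pvFoldRep_stack : ∀ (ps : List (List Char)),
    (∀ p ∈ ps, (match p with | [x, y] => pvReacts x y | _ => false) = true) →
    ∀ (s : List Char),
      (ps.foldl (fun u p => PySem.Chars.replace u p []) s).foldl pvStep [] =
        s.foldl pvStep [] := by
  intro ps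
  induction ps with
  | nil => intro _ s; rfl
  | cons p ps ih =>
    intro hps s
    have hp := hps p (by simp)
    match p, hp with
    | [x, y], hp =>
      have : (([x, y] :: ps).foldl (fun u p => PySem.Chars.replace u p []) s) =
          ps.foldl (fun u p => PySem.Chars.replace u p []) (PySem.Chars.replace s [x, y] []) := rfl
      rw [this, ih (fun q hq => hps q (by simp [hq]))]
      rw [pvReplace_eq_pvRep]
      exact pvRep_foldl x y hp s [] List.isChain_nil

-- if a whole round keeps the length, every replace of the round was the identity
theorem pvFoldRep_fix : ∀ (ps : List (List Char)),
    (∀ p ∈ ps, (match p with | [x, y] => pvReacts x y | _ => false) = true) →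
    ∀ (s : List Char),
      (ps.foldl (fun u p => PySem.Chars.replace u p []) s).length = s.length →
      ∀ p ∈ ps, PySem.Chars.replace s p [] = s := by
  intro ps
  induction ps with
  | nil => intro _ s _ p hp; simp at hp
  | cons p ps ih =>
    intro hps s hlen q hq
    have hp := hps p (by simp)
    match p, hp with
    | [x, y], hp =>
      have hstep : ([x, y] :: ps).foldl (fun u p => PySem.Chars.replace u p []) s =
          ps.foldl (fun u p => PySem.Chars.replace u p []) (PySem.Chars.replace s [x, y] []) := rfl
      rw [hstep] at hlen
      have h1 := pvFoldRep_length_le ps (PySem.Chars.replace s [x, y] [])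
      have h2 := pvReplace_length_le s [x, y]
      have heq : (PySem.Chars.replace s [x, y] []).length = s.length := by omega
      have hid : PySem.Chars.replace s [x, y] [] = s := by
        rw [pvReplace_eq_pvRep] at heq ⊢
        exact pvRep_eq_self_of_length x y s heq
      rcases List.mem_cons.mp hq with rfl | hq'
      · exact hid
      · rw [hid] at hlen
        exact ih (fun r hr => hps r (by simp [hr])) s hlen q hq'

-- a fixed point of the whole round is fully reacted
theorem pvFoldRep_fix_irr (s : List Char)
    (hlen : (pvPairs.foldl (fun u p => PySem.Chars.replace u p []) s).length = s.length) :
    pvIrr s := by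
  rw [pvIrr, List.isChain_iff_getElem]
  intro i h
  cases hr : pvReacts s[i] s[i + 1]
  · rfl
  · exfalso
    have hmem := pvReacts_mem_pairs s[i] s[i + 1] hr
    have hid := pvFoldRep_fix pvPairs pvPairs_shape s hlen _ hmem
    rw [pvReplace_eq_pvRep] at hid
    have hchain := pvRep_fix_chain s[i] s[i + 1] s hid
    rw [List.isChain_iff_getElem] at hchain
    exact hchain i h ⟨rfl, rfl⟩

-- main lemma for B: the replace fixpoint computes the stack result
theorem pvLoopB_eq_stack : ∀ (s : List Char), pvLoopB s = (s.foldl pvStep []).reverse := by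
  intro s
  induction hn : s.length using Nat.strong_induction_on generalizing s with
  | _ n ih =>
    rw [pvLoopB.eq_def]
    simp only []
    split
    · rename_i hlen
      have hirr := pvFoldRep_fix_irr s hlen
      rw [pvFoldl_of_irr s [] (by simpa using hirr)]
      simp
    · rename_i hlen
      have h1 := pvFoldRep_length_le pvPairs s
      have h2 := pvFoldRep_stack pvPairs pvPairs_shape s
      rw [ih (pvPairs.foldl (fun u p => PySem.Chars.replace u p []) s).length
        (by omega) _ rfl, h2]

-- ===== VERDICT (by name: the statement is the Claim_ definition above) =====
theorem reactedchain_spec : Claim_equal_reactedchain := by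
  intro s _
  unfold Spec_reactedchain reactedchain reactedchain_alt
  rw [pvLoopA_eq_stack, pvLoopB_eq_stack]
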